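-- pv_equiv track=rewrite | github.com/schitresh/interviewbit | arrays/partitions.py | solve
-- ===== SOURCE A (Python) =====
-- def solve(A, B):
--     arr_sum = sum(B)
--     if arr_sum % 3 != 0: return 0
--     arr_sum //= 3
--
--     count = [0 for i in range(A)]
--     cnt = 0
--     s = 0
--     for i in range(A-1, -1, -1):
--         s += B[i]
--         if s == arr_sum: cnt +=1
--         count[i] = cnt
--
--     ans = 0
--     s = 0
--     for i in range(A-2):
--         s += B[i]
--         if s == arr_sum: ans += count[i+2]
--
--     return ans
-- ===== SOURCE B (Python) =====
-- def solve(A, B):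
--     """Count the ways to cut the first A elements of B into three non-empty
--     contiguous blocks, each summing to a third of sum(B).
--
--     Single forward pass with two counters instead of a suffix-count array:
--     a cut position can close the first block (prefix == third) or open the
--     last block (remaining part of the scanned region == third); each valid
--     last-block cut pairs with every earlier first-block cut.
--     """
--     total = sum(B)
--     if total % 3 != 0:
--         return 0
--     third = total // 3
--
--     region = 0                    # sum of the A elements being partitioned
--     for i in range(A):
--         region += B[i]
--
--     ans = firsts = run = 0
--     for i in range(A - 1):
--         run += B[i]
--         if region - run == third:  # suffix after this cut is a valid last block
--             ans += firsts          # pair it with every earlier first-block cut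
--         if run == third:           # this cut can end a valid first block
--             firsts += 1
--     return ans
-- ===== Notes on version B (the rewrite author's own statement) =====
-- stated objective: simpler
-- what changed: Replaces A's suffix-count array and two passes (a backward pass filling count[] with suffix-sum hits, then a forward pass summing count[i+2]) by a single forward pass over prefix sums that keeps one counter of earlier first-block cuts, using O(1) extra space; Pre_ excludes only the inputs where both programs raise IndexError (A > len(B) with sum(B) divisible by 3).
import Mathlib
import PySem

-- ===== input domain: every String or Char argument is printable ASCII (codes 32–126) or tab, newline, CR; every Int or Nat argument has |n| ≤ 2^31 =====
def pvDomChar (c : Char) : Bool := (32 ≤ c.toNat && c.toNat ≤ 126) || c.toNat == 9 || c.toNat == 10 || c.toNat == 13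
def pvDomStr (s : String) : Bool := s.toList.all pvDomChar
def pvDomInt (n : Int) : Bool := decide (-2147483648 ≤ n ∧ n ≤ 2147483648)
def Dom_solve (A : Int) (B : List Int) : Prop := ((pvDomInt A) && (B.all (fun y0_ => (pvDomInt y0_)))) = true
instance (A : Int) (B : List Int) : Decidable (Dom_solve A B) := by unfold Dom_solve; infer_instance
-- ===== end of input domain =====

-- B replaces A's suffix-count array and two passes by a single forward pass with a
-- counter of earlier first-block cuts (same asymptotic cost, O(1) extra space).

-- ===== PORT A =====
-- loop body of A's backward pass (builds count[], counting suffix sums equal to t)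
def solveStepBack (B : List Int) (t : Int) (st : List Int × Int × Int) (i : Int) :
    List Int × Int × Int :=
  let s := st.2.2 + PySem.List.pyGetD B i 0        -- B[i]; in range for 0 ≤ i < A ≤ len(B) (Pre_)
  let cnt := if s = t then st.2.1 + 1 else st.2.1
  (PySem.List.pySetD st.1 i cnt, cnt, s)           -- count[i] = cnt; i in range

-- loop body of A's forward pass
def solveStepFwd (B count : List Int) (t : Int) (st : Int × Int) (i : Int) : Int × Int :=
  let s := st.2 + PySem.List.pyGetD B i 0          -- B[i]; in range under Pre_
  (if s = t then st.1 + PySem.List.pyGetD count (i + 2) 0 else st.1, s)  -- count[i+2]; in range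

def solve (A : Int) (B : List Int) : Int :=
  let arrSum := B.sum
  if PySem.Int.mod arrSum 3 ≠ 0 then 0
  else
    let t := PySem.Int.floordiv arrSum 3
    let count0 : List Int := (PySem.List.pyRange 0 A 1).map (fun _ => 0)
    let st1 := (PySem.List.pyRange (A - 1) (-1) (-1)).foldl (solveStepBack B t) (count0, 0, 0)
    let st2 := (PySem.List.pyRange 0 (A - 2) 1).foldl (solveStepFwd B st1.1 t) (0, 0)
    st2.1

-- ===== PORT B =====
-- loop body of B's single forward pass: state (run, firsts, ans)
def solveAltStep (B : List Int) (third region : Int) (st : Int × Int × Int) (i : Int) :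
    Int × Int × Int :=
  let run := st.1 + PySem.List.pyGetD B i 0        -- B[i]; in range under Pre_
  let ans := if region - run = third then st.2.2 + st.2.1 else st.2.2
  let firsts := if run = third then st.2.1 + 1 else st.2.1
  (run, firsts, ans)

def solve_alt (A : Int) (B : List Int) : Int :=
  let total := B.sum
  if PySem.Int.mod total 3 ≠ 0 then 0
  else
    let third := PySem.Int.floordiv total 3
    let region := (PySem.List.pyRange 0 A 1).foldl
      (fun r i => r + PySem.List.pyGetD B i 0) 0   -- B[i]; in range under Pre_
    let st := (PySem.List.pyRange 0 (A - 1) 1).foldl (solveAltStep B third region) (0, 0, 0)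
    st.2.2

-- ===== PRECONDITION & SPEC =====
-- Pre_ excludes exactly the inputs where both programs raise IndexError: A > len(B)
-- while sum(B) % 3 == 0 (both index loops then read B[len(B)]); everywhere A returns, Pre_ holds.
def Pre_solve (A : Int) (B : List Int) : Prop :=
  PySem.Int.mod B.sum 3 ≠ 0 ∨ A ≤ (B.length : Int)
instance (A : Int) (B : List Int) : Decidable (Pre_solve A B) := by
  unfold Pre_solve; infer_instance

def pvWitness_solve : Int × List Int := (3, [1, 1, 1])

def Spec_solve (A : Int) (B : List Int) (out : Int) : Prop := out = solve_alt A B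
instance (A : Int) (B : List Int) (out : Int) : Decidable (Spec_solve A B out) := by
  unfold Spec_solve; infer_instance

-- ===== CLAIM (what is proved, stated in full; the proofs are below) =====
def Claim_equal_solve : Prop :=
  ∀ (A : Int) (B : List Int), Dom_solve A B → Pre_solve A B → Spec_solve A B (solve A B)

-- ===== LEMMAS AND PROOFS =====

-- prefix sum of the first i elements
def pvPre (B : List Int) (i : ℕ) : Int := (B.take i).sum
-- indicator: prefix ending at position m sums to t
def pvInd (B : List Int) (t : Int) (m : ℕ) : Int := if pvPre B (m + 1) = t then 1 else 0
-- number of suffix starts k ∈ [k₀, N) whose suffix B[k:N] sums to t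
def pvCntSuf (B : List Int) (N : ℕ) (t : Int) (k : ℕ) : Int :=
  ∑ j ∈ Finset.Ico k N, (if pvPre B N - pvPre B j = t then 1 else 0)
-- the count list after the backward loop has processed indices ≥ i
def pvClist (B : List Int) (N : ℕ) (t : Int) (i : ℕ) : List Int :=
  (List.range N).map (fun p => if i ≤ p then pvCntSuf B N t p else 0)
-- A's forward-loop accumulator after M steps
def pvAnsA (B : List Int) (N : ℕ) (t : Int) (M : ℕ) : Int :=
  ∑ m ∈ Finset.range M, (if pvPre B (m + 1) = t then pvCntSuf B N t (m + 2) else 0)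
-- B's counters after M steps
def pvC1 (B : List Int) (t : Int) (M : ℕ) : Int := ∑ m ∈ Finset.range M, pvInd B t m
def pvAnsB (B : List Int) (t sa : Int) (M : ℕ) : Int :=
  ∑ m ∈ Finset.range M, pvInd B (sa - t) m * pvC1 B t m

theorem pvPre_succ (B : List Int) (j : ℕ) (h : j < B.length) :
    pvPre B (j + 1) = pvPre B j + B.getD j 0 := by
  unfold pvPre
  rw [List.take_add_one, List.sum_append, List.getD_eq_getElem?_getD,
    List.getElem?_eq_getElem h]
  simp

theorem pvClist_getD (B : List Int) (N : ℕ) (t : Int) (i k : ℕ) (hk : k < N) :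
    (pvClist B N t i).getD k 0 = if i ≤ k then pvCntSuf B N t k else 0 := by
  unfold pvClist
  rw [List.getD_eq_getElem?_getD, List.getElem?_map, List.getElem?_range hk]
  simp

theorem pvCntSuf_bot (B : List Int) (N : ℕ) (t : Int) (i : ℕ) (hi : i < N) :
    pvCntSuf B N t i = (if pvPre B N - pvPre B i = t then 1 else 0) + pvCntSuf B N t (i + 1) := by
  unfold pvCntSuf
  rw [Finset.sum_eq_sum_Ico_succ_bot hi]

theorem pvClist_set (B : List Int) (N : ℕ) (t : Int) (i : ℕ) (hi : i < N) :
    (pvClist B N t (i + 1)).set i (pvCntSuf B N t i) = pvClist B N t i := by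
  unfold pvClist
  apply List.ext_getElem
  · simp
  · intro p h1 h2
    simp only [List.getElem_set, List.getElem_map, List.getElem_range]
    simp only [List.length_set, List.length_map, List.length_range] at h1
    by_cases hp : p = i
    · subst hp
      simp
    · rw [if_neg (fun h => hp h.symm)]
      by_cases hle : i ≤ p
      · rw [if_pos (show i + 1 ≤ p by omega), if_pos hle]
      · rw [if_neg (show ¬ (i + 1 ≤ p) by omega), if_neg hle]

theorem back_step (B : List Int) (t : Int) (N i : ℕ) (hi : i < N) (hN : N ≤ B.length) :
    solveStepBack B t (pvClist B N t (i + 1), pvCntSuf B N t (i + 1), pvPre B N - pvPre B (i + 1))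
      ((i : ℕ) : Int) =
    (pvClist B N t i, pvCntSuf B N t i, pvPre B N - pvPre B i) := by
  unfold solveStepBack
  have hgd : PySem.List.pyGetD B ((i : ℕ) : Int) 0 = B.getD i 0 := by
    simp [PySem.List.pyGetD_natCast]
  have hs : pvPre B N - pvPre B (i + 1) + PySem.List.pyGetD B ((i : ℕ) : Int) 0 =
      pvPre B N - pvPre B i := by
    rw [hgd, pvPre_succ B i (by omega)]; ring
  simp only [hs]
  have hc : (if pvPre B N - pvPre B i = t then pvCntSuf B N t (i + 1) + 1
      else pvCntSuf B N t (i + 1)) = pvCntSuf B N t i := by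
    rw [pvCntSuf_bot B N t i hi]
    split <;> ring
  rw [hc]
  refine Prod.ext ?_ rfl
  show PySem.List.pySetD (pvClist B N t (i + 1)) ((i : ℕ) : Int) (pvCntSuf B N t i) = _
  rw [PySem.List.pySetD_natCast]
  exact pvClist_set B N t i hi

theorem back_fold (B : List Int) (t : Int) (N : ℕ) (hN : N ≤ B.length) :
    ∀ i, i ≤ N →
      (PySem.List.pyRange ((i : Int) - 1) (-1) (-1)).foldl (solveStepBack B t)
        (pvClist B N t i, pvCntSuf B N t i, pvPre B N - pvPre B i) =
      (pvClist B N t 0, pvCntSuf B N t 0, pvPre B N - pvPre B 0) := by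
  intro i
  induction i with
  | zero =>
    intro _
    rw [PySem.List.pyRange_neg_one_eq_nil (by norm_num)]
    simp [List.foldl_nil]
  | succ i ih =>
    intro hiN
    have h1 : ((i + 1 : ℕ) : Int) - 1 = (i : ℕ) := by push_cast; ring
    rw [h1, PySem.List.pyRange_neg_one_cons (by omega)]
    rw [List.foldl_cons, back_step B t N i (by omega) hN]
    exact ih (by omega)

theorem fwd_fold (B : List Int) (t : Int) (N : ℕ) (hN : N ≤ B.length) :
    ∀ M, M + 2 ≤ N →
      ((List.range M).map (fun (k : ℕ) => (k : Int))).foldl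
        (solveStepFwd B (pvClist B N t 0) t) (0, 0) =
      (pvAnsA B N t M, pvPre B M) := by
  intro M
  induction M with
  | zero => intro _; simp [pvAnsA, pvPre]
  | succ M ih =>
    intro hM
    rw [List.range_succ, List.map_append, List.foldl_append, ih (by omega)]
    simp only [List.map_cons, List.map_nil, List.foldl_cons, List.foldl_nil]
    unfold solveStepFwd
    have hs : pvPre B M + PySem.List.pyGetD B ((M : ℕ) : Int) 0 = pvPre B (M + 1) := by
      rw [PySem.List.pyGetD_natCast, pvPre_succ B M (by omega)]
    simp only [hs]
    have hidx : ((M : ℕ) : Int) + 2 = (((M + 2 : ℕ)) : Int) := by push_cast; ring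
    have hcnt : PySem.List.pyGetD (pvClist B N t 0) (((M : ℕ) : Int) + 2) 0 =
        pvCntSuf B N t (M + 2) := by
      rw [hidx, PySem.List.pyGetD_natCast, pvClist_getD B N t 0 (M + 2) (by omega)]
      simp
    rw [hcnt]
    refine Prod.ext ?_ rfl
    show (if pvPre B (M + 1) = t then pvAnsA B N t M + pvCntSuf B N t (M + 2)
        else pvAnsA B N t M) = pvAnsA B N t (M + 1)
    unfold pvAnsA
    rw [Finset.sum_range_succ]
    split <;> simp

-- B's region loop computes the prefix sum of the first M elements
theorem region_fold (B : List Int) :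
    ∀ M, M ≤ B.length →
      ((List.range M).map (fun (k : ℕ) => (k : Int))).foldl
        (fun r i => r + PySem.List.pyGetD B i 0) 0 = pvPre B M := by
  intro M
  induction M with
  | zero => intro _; simp [pvPre]
  | succ M ih =>
    intro hM
    rw [List.range_succ, List.map_append, List.foldl_append, ih (by omega)]
    simp only [List.map_cons, List.map_nil, List.foldl_cons, List.foldl_nil]
    rw [PySem.List.pyGetD_natCast, pvPre_succ B M (by omega)]

-- B's main loop invariant: state after M steps, with region = sa
theorem alt_fold (B : List Int) (t sa : Int) :
    ∀ M, M ≤ B.length →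
      ((List.range M).map (fun (k : ℕ) => (k : Int))).foldl
        (solveAltStep B t sa) (0, 0, 0) =
      (pvPre B M, pvC1 B t M, pvAnsB B t sa M) := by
  intro M
  induction M with
  | zero => intro _; simp [pvPre, pvC1, pvAnsB]
  | succ M ih =>
    intro hM
    rw [List.range_succ, List.map_append, List.foldl_append, ih (by omega)]
    simp only [List.map_cons, List.map_nil, List.foldl_cons, List.foldl_nil]
    unfold solveAltStep
    have hs : pvPre B M + PySem.List.pyGetD B ((M : ℕ) : Int) 0 = pvPre B (M + 1) := by
      rw [PySem.List.pyGetD_natCast, pvPre_succ B M (by omega)]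
    simp only [hs]
    have hcond : (sa - pvPre B (M + 1) = t) ↔ (pvPre B (M + 1) = sa - t) := by
      constructor <;> intro h <;> omega
    refine Prod.ext rfl (Prod.ext ?_ ?_)
    · show (if pvPre B (M + 1) = t then pvC1 B t M + 1 else pvC1 B t M) = pvC1 B t (M + 1)
      unfold pvC1 pvInd
      rw [Finset.sum_range_succ]
      split <;> simp
    · show (if sa - pvPre B (M + 1) = t then pvAnsB B t sa M + pvC1 B t M
          else pvAnsB B t sa M) = pvAnsB B t sa (M + 1)
      rw [if_congr hcond rfl rfl]
      unfold pvAnsB pvInd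
      rw [Finset.sum_range_succ]
      split <;> simp

-- Fubini for the triangular pair sum
theorem pair_swap (f g : ℕ → Int) (K : ℕ) :
    ∑ j ∈ Finset.range K, g j * (∑ m ∈ Finset.range j, f m) =
    ∑ m ∈ Finset.range K, f m * (∑ j ∈ Finset.Ico (m + 1) K, g j) := by
  induction K with
  | zero => simp
  | succ K ih =>
    rw [Finset.sum_range_succ, ih, Finset.sum_range_succ]
    have h1 : ∀ m ∈ Finset.range K, f m * (∑ j ∈ Finset.Ico (m + 1) (K + 1), g j) =
        f m * (∑ j ∈ Finset.Ico (m + 1) K, g j) + f m * g K := by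
      intro m hm
      rw [Finset.sum_Ico_succ_top (by simp at hm; omega), mul_add]
    rw [Finset.sum_congr rfl h1, Finset.sum_add_distrib]
    have h2 : ∑ m ∈ Finset.range K, f m * g K = g K * ∑ m ∈ Finset.range K, f m := by
      rw [← Finset.sum_mul]; ring
    rw [h2]
    simp

theorem cntSuf_shift (B : List Int) (N : ℕ) (t : Int) (k : ℕ) :
    pvCntSuf B N t (k + 1) = ∑ j ∈ Finset.Ico k (N - 1), pvInd B (pvPre B N - t) j := by
  unfold pvCntSuf pvInd
  rw [Finset.sum_Ico_eq_sum_range, Finset.sum_Ico_eq_sum_range]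
  have hlen : N - (k + 1) = N - 1 - k := by omega
  rw [hlen]
  refine Finset.sum_congr rfl fun i _ => ?_
  have h1 : k + 1 + i = k + i + 1 := by omega
  rw [h1]
  refine if_congr ?_ rfl rfl
  omega

theorem ansA_eq_ansB (B : List Int) (t : Int) (N : ℕ) (hN : 3 ≤ N) :
    pvAnsA B N t (N - 2) = pvAnsB B t (pvPre B N) (N - 1) := by
  unfold pvAnsB pvC1
  rw [pair_swap (pvInd B t) (pvInd B (pvPre B N - t)) (N - 1)]
  have hN1 : N - 1 = (N - 2) + 1 := by omega
  rw [hN1, Finset.sum_range_succ, Finset.Ico_self, Finset.sum_empty, mul_zero, add_zero]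
  unfold pvAnsA
  refine Finset.sum_congr rfl fun m hm => ?_
  rw [show m + 2 = (m + 1) + 1 from rfl, cntSuf_shift B N t (m + 1), hN1]
  unfold pvInd
  rw [boole_mul]

theorem pvAnsB_small (B : List Int) (t sa : Int) (M : ℕ) (hM : M ≤ 1) :
    pvAnsB B t sa M = 0 := by
  interval_cases M
  · simp [pvAnsB]
  · simp [pvAnsB, pvC1]

-- ===== VERDICT (by name: the statement is the Claim_ definition above) =====
theorem solve_spec : Claim_equal_solve := by
  intro A B _ hpre
  show solve A B = solve_alt A B
  by_cases hm : PySem.Int.mod B.sum 3 ≠ 0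
  · simp only [solve, solve_alt, if_pos hm]
  · have hAle : A ≤ (B.length : Int) := hpre.resolve_left (fun h => hm h)
    simp only [solve, solve_alt, if_neg hm]
    set t := PySem.Int.floordiv B.sum 3 with ht
    by_cases hApos : A ≤ 0
    · -- every loop of both programs is empty
      rw [PySem.List.pyRange_neg_one_eq_nil (by omega),
        PySem.List.pyRange_one_eq_nil (by omega : A - 2 ≤ 0),
        PySem.List.pyRange_one_eq_nil (by omega : A - 1 ≤ 0)]
      simp
    · set N := A.toNat with hNdef
      have hA : A = (N : Int) := by omega
      have hNlen : N ≤ B.length := by omega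
      have hN1 : 1 ≤ N := by omega
      -- B's side evaluates to pvAnsB … (N - 1)
      have hBside :
          ((PySem.List.pyRange 0 (A - 1) 1).foldl
            (solveAltStep B t ((PySem.List.pyRange 0 A 1).foldl
              (fun r i => r + PySem.List.pyGetD B i 0) 0)) (0, 0, 0)).2.2 =
          pvAnsB B t (pvPre B N) (N - 1) := by
        have e1 : A - 1 = (((N - 1 : ℕ)) : Int) := by omega
        rw [e1, hA, PySem.List.pyRange_zero_nat N, PySem.List.pyRange_zero_nat (N - 1),
          region_fold B N hNlen, alt_fold B t (pvPre B N) (N - 1) (by omega)]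
      rw [hBside]
      by_cases h3 : A < 3
      · -- A's forward loop is empty; B's accumulator is still 0 after ≤ 1 step
        rw [PySem.List.pyRange_one_eq_nil (by omega : A - 2 ≤ 0)]
        rw [pvAnsB_small B t (pvPre B N) (N - 1) (by omega)]
        simp
      · have hN3 : 3 ≤ N := by omega
        rw [hA]
        have e1 : (pvClist B N t N, pvCntSuf B N t N, pvPre B N - pvPre B N) =
            (List.map (fun _ => (0 : Int)) (PySem.List.pyRange 0 ((N : ℕ) : Int) 1),
              (0 : Int), (0 : Int)) := by
          refine Prod.ext ?_ (Prod.ext ?_ ?_)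
          · show pvClist B N t N = _
            rw [PySem.List.pyRange_zero_nat, List.map_map]
            unfold pvClist
            refine List.map_congr_left fun p hp => ?_
            rw [if_neg (by simp at hp; omega)]
            rfl
          · show pvCntSuf B N t N = 0
            simp [pvCntSuf]
          · show pvPre B N - pvPre B N = 0
            ring
        rw [← e1, back_fold B t N hNlen N le_rfl]
        have e2 : ((N : ℕ) : Int) - 2 = (((N - 2 : ℕ)) : Int) := by omega
        rw [e2, PySem.List.pyRange_zero_nat (N - 2)]
        rw [show (pvClist B N t 0, pvCntSuf B N t 0, pvPre B N - pvPre B 0).1 =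
            pvClist B N t 0 from rfl]
        rw [fwd_fold B t N hNlen (N - 2) (by omega)]
        exact ansA_eq_ansB B t N hN3
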